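-- pv_equiv track=rewrite | github.com/luisflaviomf/SourceAddonOptimizer | batch_compile_opt_qc.py | _count_braces
-- ===== SOURCE A (Python) =====
-- def _count_braces(line: str) -> int:
--     count = 0
--     in_quote = False
--     for ch in line:
--         if ch == '"':
--             in_quote = not in_quote
--             continue
--         if in_quote:
--             continue
--         if ch == "{":
--             count += 1
--         elif ch == "}":
--             count -= 1
--     return count
-- ===== SOURCE B (Python) =====
-- def _count_braces(line: str) -> int:
--     # segments at even indices of split('"') are exactly the unquoted text
--     return sum(s.count("{") - s.count("}")
--                for i, s in enumerate(line.split('"')) if i % 2 == 0)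
-- ===== Notes on version B (the rewrite author's own statement) =====
-- stated objective: faster
-- what changed: Replaces the character-by-character quote-state machine with a split on the double-quote character followed by summing brace balances of the even-indexed (unquoted) segments via str.count, with no explicit quote flag.
import Mathlib
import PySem

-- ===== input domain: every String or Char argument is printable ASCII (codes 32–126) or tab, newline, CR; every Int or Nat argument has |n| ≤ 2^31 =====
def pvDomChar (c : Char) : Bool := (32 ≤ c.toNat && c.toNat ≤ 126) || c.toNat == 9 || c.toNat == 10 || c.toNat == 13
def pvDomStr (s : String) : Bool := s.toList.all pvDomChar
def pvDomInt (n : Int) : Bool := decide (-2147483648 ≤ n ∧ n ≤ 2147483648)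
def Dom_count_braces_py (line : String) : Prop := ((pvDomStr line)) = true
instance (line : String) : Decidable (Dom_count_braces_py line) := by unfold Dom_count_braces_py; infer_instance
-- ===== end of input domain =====

-- B replaces A's character-level quote-state machine by splitting on the double-quote
-- character and summing brace balances of the even-indexed (unquoted) segments.

-- ===== PORT A =====
-- A's loop body, step for step: branches in source order, state (count, in_quote)
def pvStepA (st : Int × Bool) (ch : Char) : Int × Bool :=
  if ch = '"' then (st.1, !st.2)
  else if st.2 then st
  else if ch = '{' then (st.1 + 1, st.2)
  else if ch = '}' then (st.1 - 1, st.2)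
  else st

def count_braces_py (line : String) : Int :=
  (line.toList.foldl pvStepA ((0 : Int), false)).1

-- ===== PORT B =====
-- literal transliteration of Source B: sum over enumerated split segments keeping i % 2 == 0.
-- split? is `some` here since the separator is nonempty (Python raises only on an empty one).
def count_braces_py_alt (line : String) : Int :=
  (((PySem.List.enumerate ((PySem.Str.split? line "\"").getD []) 0).filter
      (fun p => PySem.Int.mod p.1 2 == 0)).foldl
    (fun acc p => acc + ((PySem.Str.count p.2 "{" : Int) - (PySem.Str.count p.2 "}" : Int))) 0)

-- ===== PRECONDITION & SPEC =====
def Spec_count_braces_py (line : String) (out : Int) : Prop := out = count_braces_py_alt line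
instance (line : String) (out : Int) : Decidable (Spec_count_braces_py line out) := by unfold Spec_count_braces_py; infer_instance

-- ===== CLAIM (what is proved, stated in full; the proofs are below) =====
def Claim_equal_count_braces_py : Prop := ∀ (line : String), Dom_count_braces_py line → Spec_count_braces_py line (count_braces_py line)

-- ===== LEMMAS AND PROOFS =====

-- brace balance of one segment
def pvBsum (s : List Char) : Int := (s.count '{' : Int) - (s.count '}' : Int)

-- alternating sum: add pvBsum of segments at even positions (flag true = even position)
def pvAltSum : Bool → List (List Char) → Int
  | _, [] => 0
  | b, s :: ss => (if b then pvBsum s else 0) + pvAltSum (!b) ss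

-- structural form of Python split on a single double-quote separator
def pvSplit (pre : List Char) : List Char → List (List Char)
  | [] => [pre]
  | c :: t => if c = '"' then pre :: pvSplit [] t else pvSplit (pre ++ [c]) t

theorem pvSplitOn_go_eq (fuel : Nat) (l cur : List Char) (acc : List (List Char))
    (h : l.length ≤ fuel) :
    PySem.Chars.splitOn.go ['"'] fuel l cur acc = acc.reverse ++ pvSplit cur.reverse l := by
  induction fuel generalizing l cur acc with
  | zero =>
    have : l = [] := List.eq_nil_of_length_eq_zero (Nat.le_zero.mp h)
    subst this
    rw [PySem.Chars.splitOn.go.eq_def]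
    simp [pvSplit]
  | succ n ih =>
    cases l with
    | nil =>
      rw [PySem.Chars.splitOn.go.eq_def]
      simp [pvSplit]
    | cons c t =>
      by_cases hc : c = '"'
      · subst hc
        rw [PySem.Chars.splitOn.go.eq_def]
        simp only []
        rw [if_pos (by simp [List.isPrefixOf])]
        simp only [List.length_singleton, List.drop_succ_cons, List.drop_zero]
        rw [ih t [] (cur.reverse :: acc) (by simpa using h)]
        simp [pvSplit]
      · rw [PySem.Chars.splitOn.go.eq_def]
        simp only []
        rw [if_neg (by simp [List.isPrefixOf]; exact fun h' => hc h'.symm)]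
        rw [ih t (c :: cur) acc (by simpa using h)]
        simp [pvSplit, hc]

theorem pvSplitOn_eq (cs : List Char) :
    PySem.Chars.splitOn cs ['"'] = pvSplit [] cs := by
  unfold PySem.Chars.splitOn
  rw [pvSplitOn_go_eq (cs.length + 1) cs [] [] (by omega)]
  simp

theorem pvCount_go_eq (c : Char) (fuel : Nat) (l : List Char) (acc : Nat)
    (h : l.length ≤ fuel) :
    PySem.Chars.count.go [c] fuel l acc = acc + l.count c := by
  induction fuel generalizing l acc with
  | zero =>
    have : l = [] := List.eq_nil_of_length_eq_zero (Nat.le_zero.mp h)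
    subst this
    rw [PySem.Chars.count.go.eq_def]
    simp
  | succ n ih =>
    cases l with
    | nil =>
      rw [PySem.Chars.count.go.eq_def]
      simp
    | cons x t =>
      by_cases hx : x = c
      · subst hx
        rw [PySem.Chars.count.go.eq_def]
        simp only []
        rw [if_pos (by simp [List.isPrefixOf])]
        simp only [List.length_singleton, List.drop_succ_cons, List.drop_zero]
        rw [ih t (acc + 1) (by simpa using h)]
        simp
        omega
      · rw [PySem.Chars.count.go.eq_def]
        simp only []
        rw [if_neg (by simp [List.isPrefixOf]; exact fun h' => hx h'.symm)]
        rw [ih t acc (by simpa using h)]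
        simp [List.count_cons]
        exact fun h' => hx h'

theorem pvCount_single (cs : List Char) (c : Char) :
    PySem.Chars.count cs [c] = cs.count c := by
  unfold PySem.Chars.count
  rw [if_neg (by simp)]
  simpa using pvCount_go_eq c cs.length cs 0 le_rfl

-- B's filtered-enumerate fold computes the alternating sum
theorem pvFoldB (parts : List (List Char)) (k acc : Int) :
    ((PySem.List.enumerate (parts.map String.ofList) k).filter
        (fun p => PySem.Int.mod p.1 2 == 0)).foldl
      (fun acc p => acc + ((PySem.Str.count p.2 "{" : Int) - (PySem.Str.count p.2 "}" : Int))) acc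
    = acc + pvAltSum (decide (k % 2 = 0)) parts := by
  induction parts generalizing k acc with
  | nil => simp [pvAltSum]
  | cons s ss ih =>
    have hmod : PySem.Int.mod k 2 = k % 2 :=
      PySem.Int.mod_eq_emod_of_pos (a := k) (b := 2) (by omega)
    by_cases hk : k % 2 = 0
    · rw [List.map_cons, PySem.List.enumerate]
      rw [List.filter_cons_of_pos (by simp; omega)]
      rw [List.foldl_cons, ih (k + 1)]
      have h1 : ¬ ((k + 1) % 2 = 0) := by omega
      simp [hk, h1, pvAltSum, pvBsum, PySem.Str.count_eq, pvCount_single]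
      ring
    · rw [List.map_cons, PySem.List.enumerate]
      rw [List.filter_cons_of_neg (by simp; omega)]
      rw [ih (k + 1)]
      have h1 : (k + 1) % 2 = 0 := by omega
      simp [hk, h1, pvAltSum]

-- A's quote-toggle fold computes the alternating sum of pvSplit, both flag states at once
theorem pvFoldA (cs : List Char) :
    (∀ (acc : Int) (pre : List Char),
      (cs.foldl pvStepA (acc, false)).1
        = acc + pvAltSum true (pvSplit pre cs) - pvBsum pre)
    ∧ (∀ (acc : Int) (pre : List Char),
      (cs.foldl pvStepA (acc, true)).1
        = acc + pvAltSum false (pvSplit pre cs)) := by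
  induction cs with
  | nil =>
    constructor
    · intro acc pre; simp [pvSplit, pvAltSum]
    · intro acc pre; simp [pvSplit, pvAltSum]
  | cons c t ih =>
    have hb : ∀ pre, ¬ c = '"' → pvBsum (pre ++ [c]) =
        pvBsum pre + (if c = '{' then 1 else if c = '}' then (-1 : Int) else 0) := by
      intro pre _
      simp only [pvBsum, List.count_append, List.count_singleton]
      by_cases h1 : c = '{' <;> by_cases h2 : c = '}' <;>
        simp [h1, h2] <;> simp_all <;> ring
    constructor
    · intro acc pre
      by_cases hc : c = '"'
      · subst hc
        rw [List.foldl_cons, show pvStepA (acc, false) '"' = (acc, true) by simp [pvStepA]]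
        rw [ih.2 acc []]
        simp [pvSplit, pvAltSum]
        ring
      · by_cases h1 : c = '{'
        · subst h1
          rw [List.foldl_cons, show pvStepA (acc, false) '{' = (acc + 1, false) by simp [pvStepA]]
          rw [ih.1 (acc + 1) (pre ++ ['{'])]
          rw [hb pre hc]
          simp [pvSplit, hc]
          ring
        · by_cases h2 : c = '}'
          · subst h2
            rw [List.foldl_cons, show pvStepA (acc, false) '}' = (acc - 1, false) by simp [pvStepA]]
            rw [ih.1 (acc - 1) (pre ++ ['}'])]
            rw [hb pre hc]
            simp [pvSplit, hc, h1]
            ring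
          · rw [List.foldl_cons, show pvStepA (acc, false) c = (acc, false) by
              simp [pvStepA, hc, h1, h2]]
            rw [ih.1 acc (pre ++ [c])]
            rw [hb pre hc]
            simp [pvSplit, hc, h1, h2]
    · intro acc pre
      by_cases hc : c = '"'
      · subst hc
        rw [List.foldl_cons, show pvStepA (acc, true) '"' = (acc, false) by simp [pvStepA]]
        rw [ih.1 acc []]
        simp [pvSplit, pvAltSum, pvBsum]
      · rw [List.foldl_cons, show pvStepA (acc, true) c = (acc, true) by simp [pvStepA, hc]]
        rw [ih.2 acc (pre ++ [c])]
        simp [pvSplit, hc]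

-- ===== VERDICT (by name: the statement is the Claim_ definition above) =====
theorem count_braces_py_spec : Claim_equal_count_braces_py := by
  intro line _
  unfold Spec_count_braces_py count_braces_py count_braces_py_alt
  rw [(pvFoldA line.toList).1 0 []]
  have hsplit : (PySem.Str.split? line "\"").getD []
      = (PySem.Chars.splitOn line.toList ['"']).map String.ofList := by
    simp [PySem.Str.split?, PySem.Chars.split?]
  rw [hsplit, pvSplitOn_eq, pvFoldB]
  simp [pvBsum]
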